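-- pv_equiv track=rewrite | github.com/BETTlM/LeetcodeDSA | 1684.count-the-number-of-consistent-strings.py | countConsistentStrings
-- ===== SOURCE A (Python) =====
-- def countConsistentStrings(allowed, words):
--     """
--     :type allowed: str
--     :type words: List[str]
--     :rtype: int
--     """
--     allw = set(allowed)
--     c = 0
--     for i in words:
--         for j in i:
--             if j not in allw:
--                 c += 1
--                 break
--     return len(words) - c
-- ===== SOURCE B (Python) =====
-- def _mask(s):
--     m = 0
--     for ch in s:
--         m |= 1 << ord(ch)
--     return m
--
-- def countConsistentStrings(allowed, words):
--     amask = _mask(allowed)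
--     count = 0
--     for w in words:
--         count += (_mask(w) | amask) == amask
--     return count
-- ===== Notes on version B (the rewrite author's own statement) =====
-- stated objective: alternative
-- what changed: Encodes allowed and each word as integer bitmasks (one bit per character code) and counts words whose mask ORed with the allowed mask leaves it unchanged, replacing A's per-character set-membership inner loop with break and subtract-from-total.
import Mathlib
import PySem

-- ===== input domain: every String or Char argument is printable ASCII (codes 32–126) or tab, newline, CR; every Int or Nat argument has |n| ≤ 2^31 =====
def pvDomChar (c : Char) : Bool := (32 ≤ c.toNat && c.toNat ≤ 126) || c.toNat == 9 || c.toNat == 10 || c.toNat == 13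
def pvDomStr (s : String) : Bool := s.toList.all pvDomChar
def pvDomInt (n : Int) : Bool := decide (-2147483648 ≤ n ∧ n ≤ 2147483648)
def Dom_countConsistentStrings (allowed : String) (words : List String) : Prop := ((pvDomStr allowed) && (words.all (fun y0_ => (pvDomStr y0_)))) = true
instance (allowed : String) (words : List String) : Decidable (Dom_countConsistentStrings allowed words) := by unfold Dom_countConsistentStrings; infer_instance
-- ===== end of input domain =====

-- B encodes allowed and each word as integer bitmasks (one bit per character code) and counts
-- words with (wordmask | allowedmask) == allowedmask, instead of A's per-character set-membership
-- inner loop with break and subtract-from-total; alternative algorithm, same cost.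

-- ===== PORT A =====
-- inner 'for j in i: if j not in allw: c += 1; break'
def pvInnerA (allw : PySem.Set Char) (c : Int) : List Char → Int
  | [] => c
  | j :: rest => if ¬ PySem.Set.contains allw j then c + 1 else pvInnerA allw c rest

def countConsistentStrings (allowed : String) (words : List String) : Int :=
  let allw := PySem.Set.ofList allowed.toList
  let c := words.foldl (fun c i => pvInnerA allw c i.toList) 0
  (words.length : Int) - c

-- ===== PORT B =====
-- helper _mask: m = 0; for ch in s: m |= 1 << ord(ch)
def pvMask (s : List Char) : Nat :=
  s.foldl (fun m ch => m ||| (1 <<< ch.toNat)) 0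

def countConsistentStrings_alt (allowed : String) (words : List String) : Int :=
  let amask := pvMask allowed.toList
  words.foldl (fun count w =>
    count + (if (pvMask w.toList ||| amask) == amask then 1 else 0)) 0

-- ===== PRECONDITION & SPEC =====
def Spec_countConsistentStrings (allowed : String) (words : List String) (out : Int) : Prop := out = countConsistentStrings_alt allowed words
instance (allowed : String) (words : List String) (out : Int) : Decidable (Spec_countConsistentStrings allowed words out) := by unfold Spec_countConsistentStrings; infer_instance

-- ===== CLAIM (what is proved, stated in full; the proofs are below) =====
def Claim_equal_countConsistentStrings : Prop := ∀ (allowed : String) (words : List String), Dom_countConsistentStrings allowed words → Spec_countConsistentStrings allowed words (countConsistentStrings allowed words)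

-- ===== LEMMAS AND PROOFS =====

lemma char_toNat_inj {c d : Char} (h : c.toNat = d.toNat) : c = d := by
  apply Char.ext
  exact UInt32.toNat_inj.mp h

lemma pv_testBit_one (j : Nat) : Nat.testBit 1 j = (j == 0) := by
  cases j with
  | zero => decide
  | succ j => rw [Nat.testBit_succ]; simp

lemma testBit_mask_aux (l : List Char) (m : Nat) (k : Nat) :
    (l.foldl (fun m ch => m ||| (1 <<< ch.toNat)) m).testBit k
      = (m.testBit k || l.any (fun c => c.toNat == k)) := by
  induction l generalizing m with
  | nil => simp
  | cons c rest ih =>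
    simp only [List.foldl_cons, List.any_cons, ih, Nat.testBit_lor, Nat.testBit_shiftLeft,
      pv_testBit_one]
    by_cases h : c.toNat = k
    · subst h; simp
    · have h1 : (c.toNat == k) = false := by simp [h]
      by_cases hle : c.toNat ≤ k
      · have h2 : (k - c.toNat == 0) = false := by
          simp only [beq_eq_false_iff_ne, ne_eq]
          omega
        simp [h1, hle, h2]
      · simp [h1, hle]

lemma testBit_mask (l : List Char) (k : Nat) :
    (pvMask l).testBit k = l.any (fun c => c.toNat == k) := by
  simp [pvMask, testBit_mask_aux]

lemma mask_subset_iff (wl al : List Char) :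
    ((pvMask wl ||| pvMask al) == pvMask al) = wl.all (fun c => PySem.Set.contains (PySem.Set.ofList al) c) := by
  apply Bool.eq_iff_iff.mpr
  rw [beq_iff_eq, List.all_eq_true]
  constructor
  · intro heq c hc
    have hw : (pvMask wl).testBit c.toNat = true := by
      rw [testBit_mask, List.any_eq_true]
      exact ⟨c, hc, by simp⟩
    have : (pvMask al).testBit c.toNat = true := by
      have := congrArg (fun n => n.testBit c.toNat) heq
      simp only [Nat.testBit_lor, hw, Bool.true_or] at this
      exact this.symm
    rw [testBit_mask, List.any_eq_true] at this
    obtain ⟨d, hd, hdk⟩ := this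
    have : d = c := char_toNat_inj (by simpa using hdk)
    subst this
    simp only [PySem.Set.contains, List.contains_iff_mem, PySem.Set.mem_ofList]
    exact hd
  · intro hall
    apply Nat.eq_of_testBit_eq
    intro k
    simp only [Nat.testBit_lor]
    by_cases hw : (pvMask wl).testBit k = true
    · rw [testBit_mask, List.any_eq_true] at hw
      obtain ⟨c, hc, hck⟩ := hw
      have hca : c ∈ al := by
        have := hall c hc
        simp only [PySem.Set.contains, List.contains_iff_mem, PySem.Set.mem_ofList] at this
        exact this
      have : (pvMask al).testBit k = true := by
        rw [testBit_mask, List.any_eq_true]; exact ⟨c, hca, hck⟩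
      simp [this]
    · simp [Bool.eq_false_iff.mpr hw]

lemma pvInnerA_eq (al : List Char) (c : Int) (l : List Char) :
    pvInnerA (PySem.Set.ofList al) c l =
      if ((pvMask l ||| pvMask al) == pvMask al) then c else c + 1 := by
  rw [mask_subset_iff]
  induction l with
  | nil => simp [pvInnerA]
  | cons j rest ih =>
    by_cases h : PySem.Set.contains (PySem.Set.ofList al) j = true
    · have hstep : pvInnerA (PySem.Set.ofList al) c (j :: rest) = pvInnerA (PySem.Set.ofList al) c rest := by
        simp only [pvInnerA]
        rw [if_neg (not_not_intro h)]
      rw [hstep, ih]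
      simp only [List.all_cons, h, Bool.true_and]
    · have hall : (j :: rest).all (fun c => PySem.Set.contains (PySem.Set.ofList al) c) = false := by
        simp only [List.all_cons, Bool.and_eq_false_iff]
        exact Or.inl (Bool.eq_false_iff.mpr h)
      simp only [pvInnerA]
      rw [if_pos h, hall]
      simp

lemma pv_main (al : List Char) (ws : List String) (c acc : Int) :
    (ws.length : Int) - ws.foldl (fun c i => pvInnerA (PySem.Set.ofList al) c i.toList) c
      = ws.foldl (fun count w =>
          count + (if (pvMask w.toList ||| pvMask al) == pvMask al then 1 else 0)) acc
        + (-c - acc) := by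
  simp only [pvInnerA_eq]
  induction ws generalizing c acc with
  | nil => ring_nf; simp
  | cons w ws ih =>
    simp only [List.foldl_cons, List.length_cons]
    split_ifs with h
    · have h1 := ih c (acc + 1)
      push_cast at h1 ⊢
      omega
    · have h1 := ih (c + 1) acc
      simp only [add_zero]
      push_cast at h1 ⊢
      omega

-- ===== VERDICT (by name: the statement is the Claim_ definition above) =====
theorem countConsistentStrings_spec : Claim_equal_countConsistentStrings := by
  intro allowed words _
  unfold Spec_countConsistentStrings countConsistentStrings countConsistentStrings_alt
  have := pv_main allowed.toList words 0 0
  simpa using this
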